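-- pv_equiv track=rewrite | github.com/ChipmunkRPA/FinResearchClaw | researchclaw/data/finance_local.py | infer_finance_dataset_kind
-- ===== SOURCE A (Python) =====
-- FINANCE_DATASET_PATTERNS: dict[str, tuple[str, ...]] = {
--     "event_study": (
--         "event_date", "announcement_date", "car", "bhar", "surprise",
--     ),
--     "factor_model": (
--         "ret", "excess_ret", "mkt_rf", "smb", "hml", "rmw", "cma", "rf",
--     ),
--     "accounting_panel": (
--         "firm_id", "gvkey", "fyear", "fqtr", "assets", "sales", "accruals",
--     ),
--     "forecast_error": (
--         "forecast", "actual", "forecast_error", "analyst_count", "consensus",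
--     ),
-- }
--
-- def normalize_columns(columns: list[str]) -> list[str]:
--     return [c.strip().lower().replace(" ", "_") for c in columns]
--
-- def infer_finance_dataset_kind(columns: list[str]) -> str:
--     """Infer a dataset family from column names.
--
--     Returns one of: event_study, factor_model, accounting_panel,
--     forecast_error, mixed_finance_panel, unknown.
--     """
--     normalized = set(normalize_columns(columns))
--
--     # Event-study data often includes factor columns too; event markers should win.
--     if {"event_date", "announcement_date", "car", "bhar", "surprise"} & normalized:
--         if {"date", "ret", "firm_id"} & normalized:
--             return "event_study"
--
--     # Forecast-error research should also outrank generic panel matching.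
--     if {"forecast", "actual", "forecast_error", "consensus"} & normalized:
--         return "forecast_error"
--
--     best_name = "unknown"
--     best_score = 0
--     for name, patterns in FINANCE_DATASET_PATTERNS.items():
--         score = sum(1 for p in patterns if p in normalized)
--         if score > best_score:
--             best_name = name
--             best_score = score
--     if best_score >= 2:
--         return best_name
--     if ({"date", "firm_id"} & normalized) and ({"ret", "assets", "sales"} & normalized):
--         return "mixed_finance_panel"
--     return "unknown"
-- ===== SOURCE B (Python) =====
-- FINANCE_DATASET_PATTERNS: dict[str, tuple[str, ...]] = {
--     "event_study": (
--         "event_date", "announcement_date", "car", "bhar", "surprise",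
--     ),
--     "factor_model": (
--         "ret", "excess_ret", "mkt_rf", "smb", "hml", "rmw", "cma", "rf",
--     ),
--     "accounting_panel": (
--         "firm_id", "gvkey", "fyear", "fqtr", "assets", "sales", "accruals",
--     ),
--     "forecast_error": (
--         "forecast", "actual", "forecast_error", "analyst_count", "consensus",
--     ),
-- }
--
-- def normalize_columns(columns: list[str]) -> list[str]:
--     return [c.strip().lower().replace(" ", "_") for c in columns]
--
-- # Inverted index: every pattern string is unique across categories.
-- _PATTERN_INDEX = {p: name for name, pats in FINANCE_DATASET_PATTERNS.items() for p in pats}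
--
-- def infer_finance_dataset_kind(columns: list[str]) -> str:
--     """Infer a dataset family from column names.
--
--     Returns one of: event_study, factor_model, accounting_panel,
--     forecast_error, mixed_finance_panel, unknown.
--     """
--     normalized = set(normalize_columns(columns))
--
--     # Event-study data often includes factor columns too; event markers should win.
--     if ({"event_date", "announcement_date", "car", "bhar", "surprise"} & normalized
--             and {"date", "ret", "firm_id"} & normalized):
--         return "event_study"
--
--     # Forecast-error research should also outrank generic panel matching.
--     if {"forecast", "actual", "forecast_error", "consensus"} & normalized:
--         return "forecast_error"
--
--     # One pass over the distinct columns, scoring via the inverted index.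
--     counts = dict.fromkeys(FINANCE_DATASET_PATTERNS, 0)
--     for col in normalized:
--         name = _PATTERN_INDEX.get(col)
--         if name is not None:
--             counts[name] += 1
--
--     best_name, best_score = "unknown", 0
--     for name, score in counts.items():
--         if score > best_score:
--             best_name, best_score = name, score
--     if best_score >= 2:
--         return best_name
--     if ({"date", "firm_id"} & normalized) and ({"ret", "assets", "sales"} & normalized):
--         return "mixed_finance_panel"
--     return "unknown"
-- ===== Notes on version B (the rewrite author's own statement) =====
-- stated objective: alternative
-- what changed: The per-category scoring loop (for each category, rescan its pattern tuple against the column set) is replaced by an inverted pattern-to-category index built once, with a single pass over the distinct normalized columns incrementing per-category counts; guards, threshold and tie-breaking are unchanged.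
import Mathlib
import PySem

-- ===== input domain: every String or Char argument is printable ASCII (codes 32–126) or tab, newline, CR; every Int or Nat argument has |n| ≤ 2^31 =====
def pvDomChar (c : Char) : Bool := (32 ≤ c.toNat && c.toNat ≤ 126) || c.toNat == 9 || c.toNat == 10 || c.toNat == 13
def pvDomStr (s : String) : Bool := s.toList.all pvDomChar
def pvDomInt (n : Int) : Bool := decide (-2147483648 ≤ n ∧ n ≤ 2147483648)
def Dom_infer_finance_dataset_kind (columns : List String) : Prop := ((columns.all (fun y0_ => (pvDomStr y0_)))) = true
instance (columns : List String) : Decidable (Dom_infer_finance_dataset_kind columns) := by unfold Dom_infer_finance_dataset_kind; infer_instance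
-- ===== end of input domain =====

-- B replaces A's per-category rescan of the column set by an inverted pattern→category
-- index consulted once per distinct column (objective: alternative decomposition).

-- ===== PORT A =====
-- module constant FINANCE_DATASET_PATTERNS (shared by both implementations)
def FINANCE_DATASET_PATTERNS : PySem.Dict String (List String) :=
  PySem.Dict.ofList [
    ("event_study", ["event_date", "announcement_date", "car", "bhar", "surprise"]),
    ("factor_model", ["ret", "excess_ret", "mkt_rf", "smb", "hml", "rmw", "cma", "rf"]),
    ("accounting_panel", ["firm_id", "gvkey", "fyear", "fqtr", "assets", "sales", "accruals"]),
    ("forecast_error", ["forecast", "actual", "forecast_error", "analyst_count", "consensus"])]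

-- module helper normalize_columns (identical in both implementations)
def normalize_columns (columns : List String) : List String :=
  columns.map (fun c => PySem.Str.replace (PySem.Str.lower (PySem.Str.strip c)) " " "_")

def infer_finance_dataset_kind (columns : List String) : String :=
  let normalized : PySem.Set String := PySem.Set.ofList (normalize_columns columns)
  -- the remainder of the function after the first (nested, fall-through) guard
  let rest :=
    if !(PySem.Set.inter ["forecast", "actual", "forecast_error", "consensus"] normalized).isEmpty then
      "forecast_error"
    else
      -- best_name/best_score loop over FINANCE_DATASET_PATTERNS.items()
      let best := FINANCE_DATASET_PATTERNS.items.foldl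
        (fun (acc : String × Int) np =>
          -- sum(1 for p in patterns if p in normalized) is a countP (0/1-sum)
          let score : Int := (np.2.countP (fun p => PySem.Set.contains normalized p) : Int)
          if acc.2 < score then (np.1, score) else acc)
        ("unknown", (0 : Int))
      if 2 ≤ best.2 then best.1
      else if (!(PySem.Set.inter ["date", "firm_id"] normalized).isEmpty)
              && (!(PySem.Set.inter ["ret", "assets", "sales"] normalized).isEmpty) then
        "mixed_finance_panel"
      else "unknown"
  if !(PySem.Set.inter ["event_date", "announcement_date", "car", "bhar", "surprise"] normalized).isEmpty then
    if !(PySem.Set.inter ["date", "ret", "firm_id"] normalized).isEmpty then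
      "event_study"
    else rest
  else rest

-- ===== PORT B =====
-- _PATTERN_INDEX = {p: name for name, pats in FINANCE_DATASET_PATTERNS.items() for p in pats}
def PATTERN_INDEX : PySem.Dict String String :=
  FINANCE_DATASET_PATTERNS.items.foldl
    (fun d np => np.2.foldl (fun d p => d.insert p np.1) d) PySem.Dict.empty

-- loop body of B's counting pass: look the column up, increment that category's count
def tally (cnts : PySem.Dict String Int) (col : String) : PySem.Dict String Int :=
  match PATTERN_INDEX.get? col with
  | some name => cnts.modify name 0 (· + 1)
  | none => cnts

def infer_finance_dataset_kind_alt (columns : List String) : String :=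
  let normalized : PySem.Set String := PySem.Set.ofList (normalize_columns columns)
  if (!(PySem.Set.inter ["event_date", "announcement_date", "car", "bhar", "surprise"] normalized).isEmpty)
      && (!(PySem.Set.inter ["date", "ret", "firm_id"] normalized).isEmpty) then
    "event_study"
  else if !(PySem.Set.inter ["forecast", "actual", "forecast_error", "consensus"] normalized).isEmpty then
    "forecast_error"
  else
    -- counts = dict.fromkeys(FINANCE_DATASET_PATTERNS, 0)
    let counts0 := FINANCE_DATASET_PATTERNS.keys.foldl
      (fun d n => d.insert n (0 : Int)) PySem.Dict.empty
    -- one pass over the distinct columns, looking each up in the inverted index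
    let counts := normalized.foldl tally counts0
    let best := counts.items.foldl
      (fun (acc : String × Int) ns => if acc.2 < ns.2 then ns else acc)
      ("unknown", (0 : Int))
    if 2 ≤ best.2 then best.1
    else if (!(PySem.Set.inter ["date", "firm_id"] normalized).isEmpty)
            && (!(PySem.Set.inter ["ret", "assets", "sales"] normalized).isEmpty) then
      "mixed_finance_panel"
    else "unknown"

-- ===== PRECONDITION & SPEC =====
def Spec_infer_finance_dataset_kind (columns : List String) (out : String) : Prop := out = infer_finance_dataset_kind_alt columns
instance (columns : List String) (out : String) : Decidable (Spec_infer_finance_dataset_kind columns out) := by unfold Spec_infer_finance_dataset_kind; infer_instance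

-- ===== CLAIM (what is proved, stated in full; the proofs are below) =====
def Claim_equal_infer_finance_dataset_kind : Prop := ∀ (columns : List String), Dom_infer_finance_dataset_kind columns → Spec_infer_finance_dataset_kind columns (infer_finance_dataset_kind columns)

-- ===== LEMMAS AND PROOFS =====

-- the four pattern lists and category names, as plain literals for the proofs
def patsE : List String := ["event_date", "announcement_date", "car", "bhar", "surprise"]
def patsF : List String := ["ret", "excess_ret", "mkt_rf", "smb", "hml", "rmw", "cma", "rf"]
def patsA : List String := ["firm_id", "gvkey", "fyear", "fqtr", "assets", "sales", "accruals"]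
def patsC : List String := ["forecast", "actual", "forecast_error", "analyst_count", "consensus"]
def allPats : List String := patsE ++ patsF ++ patsA ++ patsC
def catNames : List String := ["event_study", "factor_model", "accounting_panel", "forecast_error"]

lemma patterns_items_lit : FINANCE_DATASET_PATTERNS.items =
    [("event_study", patsE), ("factor_model", patsF),
     ("accounting_panel", patsA), ("forecast_error", patsC)] := by rfl

lemma idx_keys_lit : PATTERN_INDEX.keys = allPats := by rfl

-- a loop that skips `none` lookups is a loop over the filterMap
lemma foldl_tally_filterMap (l : List String) (d : PySem.Dict String Int) :
    l.foldl tally d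
      = (l.filterMap PATTERN_INDEX.get?).foldl (fun d x => d.modify x 0 (· + 1)) d := by
  induction l generalizing d with
  | nil => rfl
  | cons x l ih => cases h : PATTERN_INDEX.get? x <;> simp [tally, h, ih]

lemma count_filterMap {α β : Type} [BEq β] (l : List α) (y : β) (f : α → Option β) :
    (l.filterMap f).count y = l.countP (fun x => f x == some y) := by
  induction l with
  | nil => rfl
  | cons x l ih =>
    cases h : f x <;> simp [h, List.countP_cons, ih, List.count_cons]

-- intersection cardinality is symmetric: countP over one nodup list of membership in the other
lemma countP_mem_comm {l1 l2 : List String} (h1 : l1.Nodup) (h2 : l2.Nodup) :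
    l1.countP (fun x => decide (x ∈ l2)) = l2.countP (fun x => decide (x ∈ l1)) := by
  rw [List.countP_eq_length_filter, List.countP_eq_length_filter,
      ← List.toFinset_card_of_nodup (List.Nodup.filter _ h1),
      ← List.toFinset_card_of_nodup (List.Nodup.filter _ h2)]
  congr 1
  have e1 : (l1.filter (fun x => decide (x ∈ l2))).toFinset = l1.toFinset ∩ l2.toFinset := by
    ext a; simp
  have e2 : (l2.filter (fun x => decide (x ∈ l1))).toFinset = l2.toFinset ∩ l1.toFinset := by
    ext a; simp
  rw [e1, e2, Finset.inter_comm]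

-- every successful index lookup yields one of the four category names
lemma idx_values {x n : String} (h : PATTERN_INDEX.get? x = some n) : n ∈ catNames := by
  have hm : (x, n) ∈ PATTERN_INDEX.items :=
    (PySem.Dict.get?_eq_some_iff_mem_items PATTERN_INDEX x n (by decide)).mp h
  have hv : n ∈ PATTERN_INDEX.items.map (·.2) := List.mem_map_of_mem hm
  rw [show PATTERN_INDEX.items.map (·.2) =
    ["event_study", "event_study", "event_study", "event_study", "event_study",
     "factor_model", "factor_model", "factor_model", "factor_model", "factor_model",
     "factor_model", "factor_model", "factor_model",
     "accounting_panel", "accounting_panel", "accounting_panel", "accounting_panel",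
     "accounting_panel", "accounting_panel", "accounting_panel",
     "forecast_error", "forecast_error", "forecast_error", "forecast_error", "forecast_error"]
    from rfl] at hv
  fin_cases hv <;> decide

-- characterisation of the inverted index, one lemma per category
lemma idx_charE (x : String) : PATTERN_INDEX.get? x = some "event_study" ↔ x ∈ patsE := by
  constructor
  · intro h
    by_cases hx : x ∈ allPats
    · simp only [allPats, patsE, patsF, patsA, patsC, List.mem_append, List.mem_cons,
        List.not_mem_nil, or_false] at hx
      rcases hx with (((rfl|rfl|rfl|rfl|rfl)|rfl|rfl|rfl|rfl|rfl|rfl|rfl|rfl)|rfl|rfl|rfl|rfl|rfl|rfl|rfl)|rfl|rfl|rfl|rfl|rfl <;>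
        first | decide | exact absurd h (by decide)
    · have hn : PATTERN_INDEX.get? x = none :=
        (PySem.Dict.get?_eq_none_iff_not_mem_keys _ _).mpr (by rw [idx_keys_lit]; exact hx)
      simp [hn] at h
  · intro h
    simp only [patsE, List.mem_cons, List.not_mem_nil, or_false] at h
    rcases h with rfl|rfl|rfl|rfl|rfl <;> rfl

lemma idx_charF (x : String) : PATTERN_INDEX.get? x = some "factor_model" ↔ x ∈ patsF := by
  constructor
  · intro h
    by_cases hx : x ∈ allPats
    · simp only [allPats, patsE, patsF, patsA, patsC, List.mem_append, List.mem_cons,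
        List.not_mem_nil, or_false] at hx
      rcases hx with (((rfl|rfl|rfl|rfl|rfl)|rfl|rfl|rfl|rfl|rfl|rfl|rfl|rfl)|rfl|rfl|rfl|rfl|rfl|rfl|rfl)|rfl|rfl|rfl|rfl|rfl <;>
        first | decide | exact absurd h (by decide)
    · have hn : PATTERN_INDEX.get? x = none :=
        (PySem.Dict.get?_eq_none_iff_not_mem_keys _ _).mpr (by rw [idx_keys_lit]; exact hx)
      simp [hn] at h
  · intro h
    simp only [patsF, List.mem_cons, List.not_mem_nil, or_false] at h
    rcases h with rfl|rfl|rfl|rfl|rfl|rfl|rfl|rfl <;> rfl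

lemma idx_charA (x : String) : PATTERN_INDEX.get? x = some "accounting_panel" ↔ x ∈ patsA := by
  constructor
  · intro h
    by_cases hx : x ∈ allPats
    · simp only [allPats, patsE, patsF, patsA, patsC, List.mem_append, List.mem_cons,
        List.not_mem_nil, or_false] at hx
      rcases hx with (((rfl|rfl|rfl|rfl|rfl)|rfl|rfl|rfl|rfl|rfl|rfl|rfl|rfl)|rfl|rfl|rfl|rfl|rfl|rfl|rfl)|rfl|rfl|rfl|rfl|rfl <;>
        first | decide | exact absurd h (by decide)
    · have hn : PATTERN_INDEX.get? x = none :=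
        (PySem.Dict.get?_eq_none_iff_not_mem_keys _ _).mpr (by rw [idx_keys_lit]; exact hx)
      simp [hn] at h
  · intro h
    simp only [patsA, List.mem_cons, List.not_mem_nil, or_false] at h
    rcases h with rfl|rfl|rfl|rfl|rfl|rfl|rfl <;> rfl

lemma idx_charC (x : String) : PATTERN_INDEX.get? x = some "forecast_error" ↔ x ∈ patsC := by
  constructor
  · intro h
    by_cases hx : x ∈ allPats
    · simp only [allPats, patsE, patsF, patsA, patsC, List.mem_append, List.mem_cons,
        List.not_mem_nil, or_false] at hx
      rcases hx with (((rfl|rfl|rfl|rfl|rfl)|rfl|rfl|rfl|rfl|rfl|rfl|rfl|rfl)|rfl|rfl|rfl|rfl|rfl|rfl|rfl)|rfl|rfl|rfl|rfl|rfl <;>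
        first | decide | exact absurd h (by decide)
    · have hn : PATTERN_INDEX.get? x = none :=
        (PySem.Dict.get?_eq_none_iff_not_mem_keys _ _).mpr (by rw [idx_keys_lit]; exact hx)
      simp [hn] at h
  · intro h
    simp only [patsC, List.mem_cons, List.not_mem_nil, or_false] at h
    rcases h with rfl|rfl|rfl|rfl|rfl <;> rfl

-- B's counting pass, characterised: items of the counts dict after the loop
lemma counts_items (S : List String) :
    (S.foldl tally
      (FINANCE_DATASET_PATTERNS.keys.foldl (fun d n => d.insert n (0 : Int)) PySem.Dict.empty)).items
    = [("event_study", (S.countP (fun x => decide (x ∈ patsE)) : Int)),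
       ("factor_model", (S.countP (fun x => decide (x ∈ patsF)) : Int)),
       ("accounting_panel", (S.countP (fun x => decide (x ∈ patsA)) : Int)),
       ("forecast_error", (S.countP (fun x => decide (x ∈ patsC)) : Int))] := by
  rw [foldl_tally_filterMap]
  have hmem : ∀ y ∈ S.filterMap PATTERN_INDEX.get?, y ∈ catNames := by
    intro y hy
    rcases List.mem_filterMap.mp hy with ⟨x, _, hx⟩
    exact idx_values hx
  have hupd : PySem.Set.update catNames (S.filterMap PATTERN_INDEX.get?) = catNames := by
    rw [PySem.Set.update_eq_append_filter]
    have hf : (PySem.Set.ofList (S.filterMap PATTERN_INDEX.get?)).filter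
        (fun y => !(PySem.Set.contains catNames y)) = [] := by
      rw [List.filter_eq_nil_iff]
      intro a ha
      have hac : a ∈ catNames := hmem a ((PySem.Set.mem_ofList _ _).mp ha)
      simp [hac]
    rw [hf, List.append_nil]
  have hnd : ((S.filterMap PATTERN_INDEX.get?).foldl
      (fun (d : PySem.Dict String Int) x => d.modify x 0 (· + 1))
      (FINANCE_DATASET_PATTERNS.keys.foldl (fun d n => d.insert n (0 : Int)) PySem.Dict.empty)).keys.Nodup := by
    rw [PySem.Dict.keys_foldl_modify (f := fun _ _ => (· + 1))]
    rw [show (FINANCE_DATASET_PATTERNS.keys.foldl (fun d n => d.insert n (0 : Int)) PySem.Dict.empty).keys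
        = catNames from rfl]
    rw [hupd]; decide
  rw [PySem.Dict.items_eq_map_keys _ hnd 0]
  rw [PySem.Dict.keys_foldl_modify (f := fun _ _ => (· + 1))]
  rw [show (FINANCE_DATASET_PATTERNS.keys.foldl (fun d n => d.insert n (0 : Int)) PySem.Dict.empty).keys
      = catNames from rfl]
  rw [hupd]
  simp only [catNames, List.map_cons, List.map_nil]
  have hget : ∀ (n : String) (p : List String),
      (∀ x, PATTERN_INDEX.get? x = some n ↔ x ∈ p) →
      (FINANCE_DATASET_PATTERNS.keys.foldl (fun d n => d.insert n (0 : Int)) PySem.Dict.empty).getD n 0 = 0 →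
      ((S.filterMap PATTERN_INDEX.get?).foldl
        (fun (d : PySem.Dict String Int) x => d.modify x 0 (· + 1))
        (FINANCE_DATASET_PATTERNS.keys.foldl (fun d n => d.insert n (0 : Int)) PySem.Dict.empty)).getD n 0
      = (S.countP (fun x => decide (x ∈ p)) : Int) := by
    intro n p hch h0
    rw [PySem.Dict.getD_foldl_modify_add_one, h0, zero_add, count_filterMap]
    congr 1
    apply List.countP_congr
    intro x _
    by_cases hp : x ∈ p
    · have he : PATTERN_INDEX.get? x = some n := (hch x).mpr hp
      simp [he, hp]
    · have he : PATTERN_INDEX.get? x ≠ some n := fun hc => hp ((hch x).mp hc)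
      simp [hp, he]
  rw [hget "event_study" patsE idx_charE rfl, hget "factor_model" patsF idx_charF rfl,
      hget "accounting_panel" patsA idx_charA rfl, hget "forecast_error" patsC idx_charC rfl]

-- the two score expressions agree: swap the order of counting (nodup on both sides)
lemma score_swap (S : List String) (hS : S.Nodup) (p : List String) (hp : p.Nodup) :
    ((S.countP (fun x => decide (x ∈ p)) : Int))
      = ((p.countP (fun x => PySem.Set.contains S x) : Int)) := by
  rw [countP_mem_comm hS hp]
  congr 1
  apply List.countP_congr
  intro x _
  simp [pysem]

-- B's selection over the counts dict equals A's selection over the pattern dict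
lemma best_eq (S : List String) (hS : S.Nodup) :
    ((S.foldl tally
        (FINANCE_DATASET_PATTERNS.keys.foldl (fun d n => d.insert n (0 : Int)) PySem.Dict.empty)).items.foldl
      (fun (acc : String × Int) ns => if acc.2 < ns.2 then ns else acc)
      ("unknown", (0 : Int)))
    = (FINANCE_DATASET_PATTERNS.items.foldl
        (fun (acc : String × Int) np =>
          let score : Int := (np.2.countP (fun p => PySem.Set.contains S p) : Int)
          if acc.2 < score then (np.1, score) else acc)
        ("unknown", (0 : Int))) := by
  rw [counts_items S, patterns_items_lit]
  simp only [List.foldl_cons, List.foldl_nil]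
  rw [score_swap S hS patsE (by decide), score_swap S hS patsF (by decide),
      score_swap S hS patsA (by decide), score_swap S hS patsC (by decide)]

-- the whole bodies agree, for any nodup column set S
lemma core_eq (S : List String) (hS : S.Nodup) :
    (let rest :=
      if !(PySem.Set.inter ["forecast", "actual", "forecast_error", "consensus"] S).isEmpty then
        "forecast_error"
      else
        let best := FINANCE_DATASET_PATTERNS.items.foldl
          (fun (acc : String × Int) np =>
            let score : Int := (np.2.countP (fun p => PySem.Set.contains S p) : Int)
            if acc.2 < score then (np.1, score) else acc)
          ("unknown", (0 : Int))
        if 2 ≤ best.2 then best.1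
        else if (!(PySem.Set.inter ["date", "firm_id"] S).isEmpty)
                && (!(PySem.Set.inter ["ret", "assets", "sales"] S).isEmpty) then
          "mixed_finance_panel"
        else "unknown"
    if !(PySem.Set.inter ["event_date", "announcement_date", "car", "bhar", "surprise"] S).isEmpty then
      if !(PySem.Set.inter ["date", "ret", "firm_id"] S).isEmpty then
        "event_study"
      else rest
    else rest)
    =
    (if (!(PySem.Set.inter ["event_date", "announcement_date", "car", "bhar", "surprise"] S).isEmpty)
        && (!(PySem.Set.inter ["date", "ret", "firm_id"] S).isEmpty) then
      "event_study"
    else if !(PySem.Set.inter ["forecast", "actual", "forecast_error", "consensus"] S).isEmpty then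
      "forecast_error"
    else
      let counts0 := FINANCE_DATASET_PATTERNS.keys.foldl
        (fun d n => d.insert n (0 : Int)) PySem.Dict.empty
      let counts := S.foldl tally counts0
      let best := counts.items.foldl
        (fun (acc : String × Int) ns => if acc.2 < ns.2 then ns else acc)
        ("unknown", (0 : Int))
      if 2 ≤ best.2 then best.1
      else if (!(PySem.Set.inter ["date", "firm_id"] S).isEmpty)
              && (!(PySem.Set.inter ["ret", "assets", "sales"] S).isEmpty) then
        "mixed_finance_panel"
      else "unknown") := by
  simp only []
  rw [best_eq S hS]
  cases hg1 : (!(PySem.Set.inter ["event_date", "announcement_date", "car", "bhar", "surprise"] S).isEmpty) <;>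
    cases hg2 : (!(PySem.Set.inter ["date", "ret", "firm_id"] S).isEmpty) <;>
      rfl

-- ===== VERDICT (by name: the statement is the Claim_ definition above) =====
theorem infer_finance_dataset_kind_spec : Claim_equal_infer_finance_dataset_kind := by
  intro columns _
  unfold Spec_infer_finance_dataset_kind
  exact core_eq (PySem.Set.ofList (normalize_columns columns))
    (PySem.Set.nodup_ofList (normalize_columns columns))
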